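-- pv_equiv track=rewrite | github.com/swetha22p/MRBG | mapping_paradigm.py | replace_words_in_sentence_with_index
-- ===== SOURCE A (Python) =====
-- def replace_words_in_sentence_with_index(sentence, replaced_words_with_index):
--     """
--     Replaces words in a sentence using the replaced_words_with_index dictionary,
--     appending extra characters if the word partially matches a key in the dictionary.
--
--     Args:
--         sentence (str): The input sentence to process.
--         replaced_words_with_index (dict): A dictionary where keys are tuples of (index, replaced_word)
--                                           and values are new words.
--
--     Returns:
--         str: The updated sentence with words replaced as per the dictionary.
--     """
--     def find_replacement(word, index):
--         # Check if the exact word at the specific index matches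
--         key = (index, word)
--         if key in replaced_words_with_index:
--             return replaced_words_with_index[key]
--
--         # Check for partial matches
--         for (idx, replaced_word), new_word in replaced_words_with_index.items():
--             if idx == index and word.startswith(new_word):
--                 extra_chars = word[len(new_word):]
--                 return replaced_word + extra_chars
--
--         # Return the word unchanged if no match is found
--         return word
--
--     words = sentence.split()  # Split sentence into words
--     updated_words = [find_replacement(word, idx) for idx, word in enumerate(words)]  # Replace words with index tracking
--     return " ".join(updated_words)  # Join words back into a sentence
-- ===== SOURCE B (Python) =====
-- def replace_words_in_sentence_with_index(sentence, replaced_words_with_index):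
--     # Pre-group dictionary entries by index (insertion order kept), then each
--     # word scans only its own index group instead of the whole dictionary.
--     groups = {}
--     for (idx, replaced_word), new_word in replaced_words_with_index.items():
--         groups.setdefault(idx, []).append((replaced_word, new_word))
--
--     out = []
--     for i, word in enumerate(sentence.split()):
--         group = groups.get(i, [])
--         repl = None
--         for replaced_word, new_word in group:
--             if replaced_word == word:
--                 repl = new_word
--                 break
--         if repl is None:
--             for replaced_word, new_word in group:
--                 if word.startswith(new_word):
--                     repl = replaced_word + word[len(new_word):]
--                     break
--         out.append(word if repl is None else repl)
--     return " ".join(out)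
-- ===== Notes on version B (the rewrite author's own statement) =====
-- stated objective: alternative
-- what changed: B builds a dictionary of entries grouped by word index in one pass and each word scans only its own index group (exact match first, then partial), instead of A's scan of the whole dictionary per word.
import Mathlib
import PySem

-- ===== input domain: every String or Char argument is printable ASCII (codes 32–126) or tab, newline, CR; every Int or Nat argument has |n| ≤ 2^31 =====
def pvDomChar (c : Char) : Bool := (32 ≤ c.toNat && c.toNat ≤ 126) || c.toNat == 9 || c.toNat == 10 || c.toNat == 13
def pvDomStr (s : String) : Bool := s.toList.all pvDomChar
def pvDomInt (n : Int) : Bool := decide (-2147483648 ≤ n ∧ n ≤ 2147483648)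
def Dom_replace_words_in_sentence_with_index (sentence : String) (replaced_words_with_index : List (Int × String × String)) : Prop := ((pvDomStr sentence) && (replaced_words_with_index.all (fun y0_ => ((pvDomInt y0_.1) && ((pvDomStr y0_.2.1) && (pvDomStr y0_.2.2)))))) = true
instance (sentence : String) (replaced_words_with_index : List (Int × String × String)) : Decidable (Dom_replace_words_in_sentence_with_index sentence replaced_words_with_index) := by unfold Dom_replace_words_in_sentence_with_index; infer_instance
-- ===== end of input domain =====

-- B pre-groups the dictionary entries by index (insertion order preserved) so each word
-- scans only its own index group instead of the whole dictionary (objective: alternative).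


-- shared primitive: Python's `s + t` on strings (kernel-reducible, unlike String.append)
def pvStrApp (a b : String) : String := String.ofList (a.toList ++ b.toList)

-- the dict argument as Python receives it: keys (index, replaced_word), values new_word
def pvDictOf (l : List (Int × String × String)) : PySem.Dict (Int × String) String :=
  PySem.Dict.ofList (l.map (fun e => ((e.1, e.2.1), e.2.2)))

-- ===== PORT A =====
-- the `for (idx, replaced_word), new_word in ….items()` loop with early return
def pvPartialScanA : List ((Int × String) × String) → String → Int → Option String
  | [], _, _ => none
  | (k, nw) :: rest, word, index =>
      if k.1 == index && PySem.Str.startswith word nw then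
        some (pvStrApp k.2 (PySem.Str.slice word (some (PySem.Str.len nw)) none))
      else pvPartialScanA rest word index

def pvFindReplacementA (d : PySem.Dict (Int × String) String) (word : String) (index : Int) : String :=
  match d.get? (index, word) with
  | some v => v
  | none =>
      match pvPartialScanA d.items word index with
      | some r => r
      | none => word

def replace_words_in_sentence_with_index (sentence : String) (replaced_words_with_index : List (Int × String × String)) : String :=
  let d := pvDictOf replaced_words_with_index
  let words := PySem.Str.split₀ sentence
  PySem.Str.join " " ((PySem.List.enumerate words).map (fun p => pvFindReplacementA d p.2 p.1))

-- ===== PORT B =====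
-- groups.setdefault(idx, []).append((replaced_word, new_word))
def pvGroups (d : PySem.Dict (Int × String) String) : PySem.Dict Int (List (String × String)) :=
  d.items.foldl (fun g e => g.modify e.1.1 [] (fun xs => xs ++ [(e.1.2, e.2)])) PySem.Dict.empty

def pvExactB : List (String × String) → String → Option String
  | [], _ => none
  | (rw, nw) :: rest, word => if rw == word then some nw else pvExactB rest word

def pvPartialB : List (String × String) → String → Option String
  | [], _ => none
  | (rw, nw) :: rest, word =>
      if PySem.Str.startswith word nw then
        some (pvStrApp rw (PySem.Str.slice word (some (PySem.Str.len nw)) none))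
      else pvPartialB rest word

def pvReplB (g : PySem.Dict Int (List (String × String))) (word : String) (index : Int) : String :=
  let grp := g.getD index []
  match pvExactB grp word with
  | some v => v
  | none =>
      match pvPartialB grp word with
      | some r => r
      | none => word

def replace_words_in_sentence_with_index_alt (sentence : String) (replaced_words_with_index : List (Int × String × String)) : String :=
  let g := pvGroups (pvDictOf replaced_words_with_index)
  PySem.Str.join " " ((PySem.List.enumerate (PySem.Str.split₀ sentence)).map (fun p => pvReplB g p.2 p.1))

-- ===== PRECONDITION & SPEC =====
def Spec_replace_words_in_sentence_with_index (sentence : String) (replaced_words_with_index : List (Int × String × String)) (out : String) : Prop := out = replace_words_in_sentence_with_index_alt sentence replaced_words_with_index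
instance (sentence : String) (replaced_words_with_index : List (Int × String × String)) (out : String) : Decidable (Spec_replace_words_in_sentence_with_index sentence replaced_words_with_index out) := by unfold Spec_replace_words_in_sentence_with_index; infer_instance

-- ===== CLAIM (what is proved, stated in full; the proofs are below) =====
def Claim_equal_replace_words_in_sentence_with_index : Prop := ∀ (sentence : String) (replaced_words_with_index : List (Int × String × String)), Dom_replace_words_in_sentence_with_index sentence replaced_words_with_index → Spec_replace_words_in_sentence_with_index sentence replaced_words_with_index (replace_words_in_sentence_with_index sentence replaced_words_with_index)

-- ===== LEMMAS AND PROOFS =====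

-- the index-i group of entries of L, as B sees it
def pvGrpOf (L : List ((Int × String) × String)) (i : Int) : List (String × String) :=
  (L.filter (fun e => e.1.1 == i)).map (fun e => (e.1.2, e.2))

theorem pvGrpOf_cons (e : (Int × String) × String) (L : List ((Int × String) × String)) (i : Int) :
    pvGrpOf (e :: L) i = if e.1.1 = i then (e.1.2, e.2) :: pvGrpOf L i else pvGrpOf L i := by
  by_cases h : e.1.1 = i <;> simp [pvGrpOf, h]

-- grouping invariant for B's foldl
theorem pvGroups_getD (L : List ((Int × String) × String))
    (g : PySem.Dict Int (List (String × String))) (i : Int) :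
    (L.foldl (fun g e => g.modify e.1.1 [] (fun xs => xs ++ [(e.1.2, e.2)])) g).getD i []
      = g.getD i [] ++ pvGrpOf L i := by
  induction L generalizing g with
  | nil => simp [pvGrpOf]
  | cons e L ih =>
      rw [List.foldl_cons, ih, pvGrpOf_cons, PySem.Dict.getD_modify]
      by_cases h : i = e.1.1 <;> simp [h, eq_comm]

-- exact lookup = scan of the index group
theorem pvGet_eq_exact (L : List ((Int × String) × String)) (i : Int) (w : String) :
    (PySem.Dict.mk L).get? (i, w) = pvExactB (pvGrpOf L i) w := by
  induction L with
  | nil => simp [pvGrpOf, pvExactB, PySem.Dict.get?]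
  | cons e L ih =>
      obtain ⟨⟨idx, rw'⟩, nw⟩ := e
      rw [PySem.Dict.get?_mk_cons, pvGrpOf_cons]
      by_cases hi : idx = i
      · subst hi
        by_cases hw : rw' = w
        · subst hw; simp [pvExactB]
        · simp [pvExactB, hw, ih, Prod.ext_iff]
      · simp [hi, ih, Prod.ext_iff]

theorem pvPartialB_cons (rw nw : String) (rest : List (String × String)) (word : String) :
    pvPartialB ((rw, nw) :: rest) word
      = if PySem.Str.startswith word nw then
          some (pvStrApp rw (PySem.Str.slice word (some (PySem.Str.len nw)) none))
        else pvPartialB rest word := rfl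

theorem pvPartialScanA_cons (k : Int × String) (nw : String)
    (rest : List ((Int × String) × String)) (word : String) (index : Int) :
    pvPartialScanA ((k, nw) :: rest) word index
      = if k.1 == index && PySem.Str.startswith word nw then
          some (pvStrApp k.2 (PySem.Str.slice word (some (PySem.Str.len nw)) none))
        else pvPartialScanA rest word index := rfl

-- partial scan over the full dict = partial scan of the index group
theorem pvPartial_eq (L : List ((Int × String) × String)) (i : Int) (w : String) :
    pvPartialScanA L w i = pvPartialB (pvGrpOf L i) w := by
  induction L with
  | nil => rfl
  | cons e L ih =>
      obtain ⟨⟨idx, rw'⟩, nw⟩ := e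
      by_cases hi : idx = i
      · subst hi
        have h1 : pvGrpOf (((idx, rw'), nw) :: L) idx = (rw', nw) :: pvGrpOf L idx := by
          simp [pvGrpOf]
        rw [h1, pvPartialScanA_cons, pvPartialB_cons]
        simp only [beq_self_eq_true, Bool.true_and]
        split_ifs with hs
        · rfl
        · exact ih
      · have h1 : pvGrpOf (((idx, rw'), nw) :: L) i = pvGrpOf L i := by
          simp [pvGrpOf, hi]
        rw [h1, pvPartialScanA_cons, if_neg (by simp [hi])]
        exact ih

theorem pvRepl_eq (d : PySem.Dict (Int × String) String) (w : String) (i : Int) :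
    pvFindReplacementA d w i = pvReplB (pvGroups d) w i := by
  have hg : (pvGroups d).getD i [] = pvGrpOf d.items i := by
    rw [pvGroups, pvGroups_getD]
    simp [PySem.Dict.getD_empty]
  have hget : d.get? (i, w) = pvExactB (pvGrpOf d.items i) w := by
    obtain ⟨L⟩ := d
    exact pvGet_eq_exact L i w
  unfold pvFindReplacementA pvReplB
  rw [hg, hget, pvPartial_eq d.items i w]

-- ===== VERDICT (by name: the statement is the Claim_ definition above) =====
theorem replace_words_in_sentence_with_index_spec : Claim_equal_replace_words_in_sentence_with_index := by
  intro sentence rww _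
  unfold Spec_replace_words_in_sentence_with_index
  simp only [replace_words_in_sentence_with_index, replace_words_in_sentence_with_index_alt]
  congr 1
  apply List.map_congr_left
  intro p _
  exact pvRepl_eq _ _ _
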